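-- pv_equiv track=rewrite | github.com/gerald-guerrero/inventory_manager | Jason_stats.py | get_top_item
-- ===== SOURCE A (Python) =====
-- def get_top_item(inventory_list):   # get the top item (highest number) in the inventory list
--     combined_inventory = {}
--     for inventory in inventory_list:
--         for item, quantity in inventory.items():
--             if item in combined_inventory:
--                 combined_inventory[item] += quantity
--             else:
--                 combined_inventory[item] = quantity
--     try:
--         return max(combined_inventory, key=combined_inventory.get)
--     except ValueError:                       #Except block should only work if numbers are not present
--         return None
-- ===== SOURCE B (Python) =====
-- def get_top_item(inventory_list):
--     # merge with dict.get default, then pick the winner by a stable sort on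
--     # descending total (stability reproduces max's first-maximal tie-break)
--     combined = {}
--     for inventory in inventory_list:
--         for item, quantity in inventory.items():
--             combined[item] = combined.get(item, 0) + quantity
--     if not combined:
--         return None
--     return sorted(combined.items(), key=lambda kv: -kv[1])[0][0]
-- ===== Notes on version B (the rewrite author's own statement) =====
-- stated objective: alternative
-- what changed: The membership-test/else merge becomes a single get-with-default insert, and the linear max(combined, key=combined.get) scan is replaced by a stable sort of the items on descending total (stability preserves max's first-maximal tie-break) taking the head, with an explicit None guard for the empty case.
import Mathlib
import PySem

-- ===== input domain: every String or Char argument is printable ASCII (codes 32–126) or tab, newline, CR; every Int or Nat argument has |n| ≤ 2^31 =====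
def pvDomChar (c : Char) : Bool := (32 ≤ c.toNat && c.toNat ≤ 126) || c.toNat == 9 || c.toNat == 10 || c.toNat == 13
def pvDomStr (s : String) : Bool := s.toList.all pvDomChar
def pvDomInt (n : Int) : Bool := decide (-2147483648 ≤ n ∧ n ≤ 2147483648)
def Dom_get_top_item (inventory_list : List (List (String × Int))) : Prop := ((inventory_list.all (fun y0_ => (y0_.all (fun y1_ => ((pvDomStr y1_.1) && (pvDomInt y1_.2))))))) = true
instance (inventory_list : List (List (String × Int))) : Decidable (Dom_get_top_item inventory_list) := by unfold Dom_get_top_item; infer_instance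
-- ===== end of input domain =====

-- B merges with get-with-default and selects the top item by a stable sort on
-- descending total (head of the sort), instead of A's membership-test merge and
-- max(…, key=dict.get) scan; same return value, no speed claim.

-- ===== PORT A =====
def get_top_item (inventory_list : List (List (String × Int))) : Option String :=
  let combined := inventory_list.foldl (fun d inv =>
      (PySem.Dict.ofList inv).items.foldl (fun d p =>
        if d.contains p.1 then d.modify p.1 0 (fun v => v + p.2) else d.insert p.1 p.2) d)
    PySem.Dict.empty
  -- max(combined, key=combined.get): every key is present, so get k = combined[k];
  -- ported as getD k 0; max? is none exactly when combined is empty (the ValueError → None branch)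
  PySem.List.max? combined.keys (fun k => combined.getD k 0)

-- ===== PORT B =====
def get_top_item_alt (inventory_list : List (List (String × Int))) : Option String :=
  let combined := inventory_list.foldl (fun d inv =>
      (PySem.Dict.ofList inv).items.foldl (fun d p =>
        d.insert p.1 (d.getD p.1 0 + p.2)) d)
    PySem.Dict.empty
  if combined.items = [] then none
  else
    match PySem.List.sorted combined.items (fun kv => -kv.2) false with
    | [] => none          -- unreachable: sorted of a nonempty list is nonempty
    | kv :: _ => some kv.1

-- ===== PRECONDITION & SPEC =====
def Spec_get_top_item (inventory_list : List (List (String × Int))) (out : Option String) : Prop := out = get_top_item_alt inventory_list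
instance (inventory_list : List (List (String × Int))) (out : Option String) : Decidable (Spec_get_top_item inventory_list out) := by unfold Spec_get_top_item; infer_instance

-- ===== CLAIM (what is proved, stated in full; the proofs are below) =====
def Claim_equal_get_top_item : Prop := ∀ (inventory_list : List (List (String × Int))), Dom_get_top_item inventory_list → Spec_get_top_item inventory_list (get_top_item inventory_list)

-- ===== LEMMAS AND PROOFS =====

-- A's merge step and B's merge step are the same dict update
theorem step_eq :
    (fun (d : PySem.Dict String Int) (p : String × Int) =>
      if d.contains p.1 then d.modify p.1 0 (fun v => v + p.2) else d.insert p.1 p.2)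
    = (fun (d : PySem.Dict String Int) (p : String × Int) =>
      d.insert p.1 (d.getD p.1 0 + p.2)) := by
  funext d p
  by_cases h : d.contains p.1
  · simp [h, PySem.Dict.modify]
  · rw [if_neg h, PySem.Dict.getD_of_not_contains d 0 (by simpa using h), zero_add]

-- the merged dict has unique keys
theorem nodup_fold (ls : List (List (String × Int))) (d : PySem.Dict String Int)
    (h : d.keys.Nodup) :
    (ls.foldl (fun d inv =>
      (PySem.Dict.ofList inv).items.foldl (fun d p =>
        d.insert p.1 (d.getD p.1 0 + p.2)) d) d).keys.Nodup := by
  induction ls generalizing d with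
  | nil => simpa using h
  | cons inv rest ih =>
    simp only [List.foldl_cons]
    exact ih _ (PySem.Dict.nodup_keys_foldl_insert_key _ Prod.fst _ _ h)

-- head of the stable ascending sort on the negated key is Python's first maximum
theorem head_sorted_neg {α : Type} (l : List α) (key : α → Int) :
    (PySem.List.sorted l (fun x => -(key x)) false).head? = PySem.List.max? l key := by
  induction l using List.reverseRecOn with
  | nil => rfl
  | append_singleton l x ih =>
    have hsort : PySem.List.sorted (l ++ [x]) (fun x => -(key x)) false
        = PySem.List.insertBy (fun a b => decide (-(key a) < -(key b))) x
            (PySem.List.sorted l (fun x => -(key x)) false) := by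
      simp [PySem.List.sorted, List.foldl_append]
    have hmax : PySem.List.max? (l ++ [x]) key
        = (match PySem.List.max? l key with
           | none => some x
           | some m => if key m < key x then some x else some m) := by
      simp only [PySem.List.max?]
      rw [List.foldl_append]
      rfl
    rw [hsort, hmax]
    rcases hs : PySem.List.sorted l (fun x => -(key x)) false with _ | ⟨m, t⟩ <;>
      rw [hs] at ih
    · rw [show (([] : List α).head?) = none from rfl] at ih
      rw [← ih]; rfl
    · rw [List.head?_cons] at ih
      rw [← ih]
      simp only [PySem.List.insertBy]
      by_cases h : key m < key x
      · rw [if_pos (by simpa using h), if_pos h]; rfl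
      · rw [if_neg (by simpa using h), if_neg h]; rfl

-- max? commutes with map
theorem max?_foldl_map {α β : Type} (l : List α) (g : α → β) (key : β → Int)
    (acc : Option α) :
    List.foldl (fun acc x => match acc with
        | none => some x
        | some m => if key m < key x then some x else some m)
      (acc.map g) (l.map g)
    = (List.foldl (fun acc x => match acc with
        | none => some x
        | some m => if key (g m) < key (g x) then some x else some m) acc l).map g := by
  induction l generalizing acc with
  | nil => rfl
  | cons x t ih =>
    simp only [List.map_cons, List.foldl_cons]
    rw [← ih]
    rcases acc with _ | m
    · rfl
    · simp only [Option.map_some]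
      by_cases h : key (g m) < key (g x) <;> simp [h]

theorem max?_map {α β : Type} (l : List α) (g : α → β) (key : β → Int) :
    PySem.List.max? (l.map g) key = (PySem.List.max? l (fun a => key (g a))).map g := by
  simpa [PySem.List.max?] using max?_foldl_map l g key none

-- the selection step: first-max over keys = head of stable sort of items by descending value
theorem sel (c : PySem.Dict String Int) (h : c.keys.Nodup) :
    PySem.List.max? c.keys (fun k => c.getD k 0)
    = (if c.items = [] then none
       else
        match PySem.List.sorted c.items (fun kv => -kv.2) false with
        | [] => none
        | kv :: _ => some kv.1) := by
  by_cases he : c.items = []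
  · have hk : c.keys = [] := by simp [PySem.Dict.keys, he]
    simp [he, hk, PySem.List.max?]
  · rw [if_neg he, PySem.Dict.items_eq_map_keys c h 0]
    have hmatch : ∀ (xs : List (String × Int)),
        (match xs with | [] => none | kv :: _ => some kv.1)
        = xs.head?.map Prod.fst := by
      intro xs; cases xs <;> rfl
    rw [hmatch,
      head_sorted_neg (c.keys.map (fun k => (k, c.getD k 0))) (fun kv => kv.2),
      max?_map c.keys (fun k => (k, c.getD k 0)) (fun kv => kv.2),
      Option.map_map]
    rw [show (Prod.fst ∘ fun k : String => (k, c.getD k 0)) = id from rfl, Option.map_id, id]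

-- ===== VERDICT (by name: the statement is the Claim_ definition above) =====
theorem get_top_item_spec : Claim_equal_get_top_item := by
  intro l _
  unfold Spec_get_top_item get_top_item get_top_item_alt
  rw [step_eq]
  exact sel _ (nodup_fold l PySem.Dict.empty (by simp))
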